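-- pv_equiv track=rewrite | github.com/ccss17/bpm | slicer2_ver4.py | sil2seg
-- ===== SOURCE A (Python) =====
-- def sil2seg(sil_tags, len_rms_list):
--     result = []
--     # 첫 번째 튜플의 첫 번째 값이 0이 아닐 경우 (0, 해당 값 - 1) 추가
--     if sil_tags[0][0] != 0:
--         result.append((0, sil_tags[0][0] - 1))
--
--     # 중간 튜플 처리
--     for i in range(len(sil_tags) - 1):
--         result.append((sil_tags[i][1] + 1, sil_tags[i + 1][0] - 1))
--
--     # 마지막 튜플 처리
--     result.append((sil_tags[-1][1] + 1, len_rms_list))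
--
--     return result
-- ===== SOURCE B (Python) =====
-- def sil2seg(sil_tags, len_rms_list):
--     # Structural recursion over the tag list: each silence tag contributes the
--     # gap that follows it (up to the next tag's start, or len_rms_list at the
--     # end); an optional leading gap is prepended when the first silence does
--     # not start at 0.
--     def gaps(tags):
--         if len(tags) == 1:
--             return [(tags[0][1] + 1, len_rms_list)]
--         return [(tags[0][1] + 1, tags[1][0] - 1)] + gaps(tags[1:])
--     head = [(0, sil_tags[0][0] - 1)] if sil_tags[0][0] != 0 else []
--     return head + gaps(sil_tags)
-- ===== Notes on version B (the rewrite author's own statement) =====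
-- stated objective: alternative
-- what changed: Replaces A's head-guard + index loop over range(len-1) + tail append with a structural recursion on the tag list in which each tag emits the gap that follows it, plus a prepended leading gap.
import Mathlib
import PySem

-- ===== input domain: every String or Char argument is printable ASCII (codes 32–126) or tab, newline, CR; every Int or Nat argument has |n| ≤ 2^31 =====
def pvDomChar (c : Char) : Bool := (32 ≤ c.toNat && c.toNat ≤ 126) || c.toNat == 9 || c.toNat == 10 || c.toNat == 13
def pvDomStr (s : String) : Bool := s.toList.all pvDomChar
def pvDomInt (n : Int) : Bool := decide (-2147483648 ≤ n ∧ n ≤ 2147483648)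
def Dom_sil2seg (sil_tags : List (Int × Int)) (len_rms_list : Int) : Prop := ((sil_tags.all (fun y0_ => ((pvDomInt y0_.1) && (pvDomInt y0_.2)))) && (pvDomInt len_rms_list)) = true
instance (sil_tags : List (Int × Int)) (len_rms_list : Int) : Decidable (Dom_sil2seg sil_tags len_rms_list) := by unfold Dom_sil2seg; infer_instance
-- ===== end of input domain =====

-- B replaces A's interleaved index loop with a structural recursion on the tag list (each tag emits its following gap); same O(n) cost, different decomposition.


-- ===== PORT A =====
def sil2seg (sil_tags : List (Int × Int)) (len_rms_list : Int) : List (Int × Int) :=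
  let d : Int × Int := (0, 0)
  -- result = []; if sil_tags[0][0] != 0: result.append((0, sil_tags[0][0] - 1))
  let result : List (Int × Int) :=
    if (PySem.List.pyGetD sil_tags 0 d).1 ≠ 0 then
      [((0 : Int), (PySem.List.pyGetD sil_tags 0 d).1 - 1)]
    else []
  -- for i in range(len(sil_tags) - 1): result.append((sil_tags[i][1] + 1, sil_tags[i+1][0] - 1))
  let result :=
    (PySem.List.pyRange 0 ((sil_tags.length : Int) - 1)).foldl
      (fun acc i =>
        acc ++ [((PySem.List.pyGetD sil_tags i d).2 + 1,
                 (PySem.List.pyGetD sil_tags (i + 1) d).1 - 1)]) result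
  -- result.append((sil_tags[-1][1] + 1, len_rms_list))
  result ++ [((PySem.List.pyGetD sil_tags (-1) d).2 + 1, len_rms_list)]

-- ===== PORT B =====
-- Python's inner 'gaps' is only ever called on a nonempty list (Pre_ excludes
-- the empty input, where Python raises); the [] branch is the structural base
-- the recursion never reaches on admitted inputs.
def sil2segGaps (len_rms_list : Int) : List (Int × Int) → List (Int × Int)
  | [] => []
  | [t] => [(t.2 + 1, len_rms_list)]
  | t :: u :: rest => (t.2 + 1, u.1 - 1) :: sil2segGaps len_rms_list (u :: rest)

def sil2seg_alt (sil_tags : List (Int × Int)) (len_rms_list : Int) : List (Int × Int) :=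
  let head : List (Int × Int) :=
    if (PySem.List.pyGetD sil_tags 0 (0, 0)).1 ≠ 0 then
      [((0 : Int), (PySem.List.pyGetD sil_tags 0 (0, 0)).1 - 1)]
    else []
  head ++ sil2segGaps len_rms_list sil_tags

-- ===== PRECONDITION & SPEC =====
-- Pre_ excludes only the empty list, on which A raises IndexError (sil_tags[0]).
def Pre_sil2seg (sil_tags : List (Int × Int)) (len_rms_list : Int) : Prop :=
  sil_tags ≠ []
instance (sil_tags : List (Int × Int)) (len_rms_list : Int) : Decidable (Pre_sil2seg sil_tags len_rms_list) := by unfold Pre_sil2seg; infer_instance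
def pvWitness_sil2seg : (List (Int × Int)) × Int := ([((2 : Int), (3 : Int))], 7)
def Spec_sil2seg (sil_tags : List (Int × Int)) (len_rms_list : Int) (out : List (Int × Int)) : Prop := out = sil2seg_alt sil_tags len_rms_list
instance (sil_tags : List (Int × Int)) (len_rms_list : Int) (out : List (Int × Int)) : Decidable (Spec_sil2seg sil_tags len_rms_list out) := by unfold Spec_sil2seg; infer_instance

-- ===== CLAIM (what is proved, stated in full; the proofs are below) =====
def Claim_equal_sil2seg : Prop := ∀ (sil_tags : List (Int × Int)) (len_rms_list : Int), Dom_sil2seg sil_tags len_rms_list → Pre_sil2seg sil_tags len_rms_list → Spec_sil2seg sil_tags len_rms_list (sil2seg sil_tags len_rms_list)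

-- ===== LEMMAS AND PROOFS =====

theorem pyGetD_cons_zero (x : Int × Int) (t : List (Int × Int)) (d : Int × Int) :
    PySem.List.pyGetD (x :: t) 0 d = x := by
  simp [PySem.List.pyGetD, PySem.List.pyGet?, PySem.List.pyIdx?]

theorem pyGetD_neg_one (x : Int × Int) (t : List (Int × Int)) (d : Int × Int) :
    PySem.List.pyGetD (x :: t) (-1) d = (x :: t).getLastD d := by
  simp [PySem.List.pyGetD, PySem.List.pyGet?, PySem.List.pyIdx?,
    List.getLast?_eq_getElem?]

-- A's middle pairs (Nat-indexed) plus its final pair are exactly B's recursion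
theorem gaps_eq (x : Int × Int) (t : List (Int × Int)) (len : Int) (d : Int × Int) :
    ((List.range t.length).map
        (fun k => (((x :: t).getD k d).2 + 1, ((x :: t).getD (k + 1) d).1 - 1)))
      ++ [(((x :: t).getLastD d).2 + 1, len)]
    = sil2segGaps len (x :: t) := by
  induction t generalizing x with
  | nil => simp [sil2segGaps]
  | cons y t' ih =>
    have h := ih y
    simp only [List.length_cons, List.range_succ_eq_map, List.map_cons, List.map_map,
      Function.comp_def, List.getD_cons_succ, List.getD_cons_zero, List.getLastD_cons,
      List.cons_append, sil2segGaps] at h ⊢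
    rw [h]

theorem cast_succ_getD (xs : List (Int × Int)) (d : Int × Int) (k : Nat) :
    PySem.List.pyGetD xs ((k : Int) + 1) d = xs.getD (k + 1) d := by
  rw [show ((k : Int) + 1) = ((k + 1 : Nat) : Int) by push_cast; ring,
    PySem.List.pyGetD_natCast]

-- ===== VERDICT (by name: the statement is the Claim_ definition above) =====
theorem sil2seg_spec : Claim_equal_sil2seg := by
  intro sil_tags len_rms_list _hdom hpre
  unfold Spec_sil2seg
  obtain ⟨x, t, rfl⟩ : ∃ x t, sil_tags = x :: t := by
    cases sil_tags with
    | nil => exact absurd rfl hpre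
    | cons a l => exact ⟨a, l, rfl⟩
  unfold sil2seg sil2seg_alt
  have hlen : (((x :: t).length : Int) - 1) = ((t.length : Nat) : Int) := by
    simp
  simp only [pyGetD_cons_zero, pyGetD_neg_one, PySem.List.foldl_append_singleton_eq_map,
    hlen, PySem.List.pyRange_zero_natCast, List.map_map, Function.comp_def,
    PySem.List.pyGetD_natCast, cast_succ_getD]
  rw [List.append_assoc, gaps_eq]
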